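-- pv_equiv track=rewrite | github.com/AKTKUMAR77/College_Companion | college_companion_backend/models.py | decode_roll
-- ===== SOURCE A (Python) =====
-- def decode_roll(roll):
--     year = "20" + roll[:2]
--
--     branch_map = {
--         "1212": "AI-DS",
--         "1221": "VLSI",
--         "121": "CSE",
--         "132": "CE",
--         "131": "ME",
--         "122": "ECE",
--         "123": "EEE",
--     }
--
--     branch = None
--     branch_code = None
--
--     roll_body = roll[2:]
--
--     # 🔥 Match LONGEST code first
--     for code in sorted(branch_map.keys(), key=len, reverse=True):
--         if roll_body.startswith(code):
--             branch = branch_map[code]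
--             branch_code = code
--             break
--
--     if branch is None:
--         return {"error": "Invalid branch code"}
--
--     roll_no = int(roll_body[len(branch_code):])
--
--     section = None
--     group = None
--
--     # Section/group ONLY for CSE
--     if branch == "CSE":
--         section = "CS1" if roll_no <= 65 else "CS2"
--         group = "G1" if roll_no <= 33 else "G2"
--     # For ECE/EEE/CE/ME: do not split into section names like ME1/ME2.
--     # Keep a single section per branch and map roll numbers into 4 groups.
--     elif branch in {"ECE", "EEE", "CE", "ME"}:
--         section = branch
--         if 1 <= roll_no <= 25:
--             group = "G1"
--         elif 26 <= roll_no <= 50: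
--             group = "G2"
--         elif 51 <= roll_no <= 75:
--             group = "G3"
--         elif 76 <= roll_no <= 99:
--             group = "G4"
--
--     return {
--         "year": year,
--         "branch": branch,
--         "section": section,
--         "group": group
--     }
-- ===== SOURCE B (Python) =====
-- def decode_roll(roll):
--     year = "20" + roll[:2]
--     body = roll[2:]
--     four = {"1212": "AI-DS", "1221": "VLSI"}
--     three = {"121": "CSE", "132": "CE", "131": "ME", "122": "ECE", "123": "EEE"}
--     if body[:4] in four:
--         code = body[:4]
--         branch = four[code]
--     elif body[:3] in three:
--         code = body[:3]
--         branch = three[code]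
--     else:
--         return {"error": "Invalid branch code"}
--     roll_no = int(body[len(code):])
--     section = None
--     group = None
--     if branch == "CSE":
--         section = "CS1" if roll_no <= 65 else "CS2"
--         group = "G1" if roll_no <= 33 else "G2"
--     elif branch in ("ECE", "EEE", "CE", "ME"):
--         section = branch
--         group = "G" + str((roll_no - 1) // 25 + 1) if 1 <= roll_no <= 99 else None
--     return {"year": year, "branch": branch, "section": section, "group": group}
-- ===== Notes on version B (the rewrite author's own statement) =====
-- stated objective: simpler
-- what changed: Replaces A's sort-keys-by-length-then-linear-scan branch matching with two fixed-length prefix lookups (a 4-char-code dict, then a 3-char-code dict) and replaces the four explicit group range branches for ECE/EEE/CE/ME with a single closed-form group index (roll_no - 1) // 25 + 1 for rolls between 1 and 99.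
import Mathlib
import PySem

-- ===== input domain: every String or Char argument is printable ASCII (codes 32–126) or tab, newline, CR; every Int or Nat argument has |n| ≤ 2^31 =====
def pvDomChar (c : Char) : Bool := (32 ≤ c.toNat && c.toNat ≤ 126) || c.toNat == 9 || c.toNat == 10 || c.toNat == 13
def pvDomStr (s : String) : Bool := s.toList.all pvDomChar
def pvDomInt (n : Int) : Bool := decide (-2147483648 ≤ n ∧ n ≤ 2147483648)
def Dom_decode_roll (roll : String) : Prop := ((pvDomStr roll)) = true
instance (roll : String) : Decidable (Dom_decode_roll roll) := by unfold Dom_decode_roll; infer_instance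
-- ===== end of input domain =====

-- B replaces A's sorted-by-length linear scan over the branch map with two fixed-length prefix
-- lookups (4-char codes first, then 3-char codes) and replaces the four group range branches with
-- the closed form 'G' + str((roll_no-1)//25+1); objective: simpler.

-- ===== PORT A =====

-- A's branch_map literal
def brMapA : PySem.Dict String String :=
  PySem.Dict.ofList [("1212","AI-DS"),("1221","VLSI"),("121","CSE"),("132","CE"),
                     ("131","ME"),("122","ECE"),("123","EEE")]

-- A's 'for code in sorted(...): if roll_body.startswith(code): branch=...; branch_code=...; break'
def loopA (body : String) : List String → Option (String × String)
  | [] => none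
  | c :: rest =>
      if PySem.Str.startswith body c then some (brMapA.getD c "", c) else loopA body rest

def decode_roll (roll : String) : List (String × Option String) :=
  let year := "20" ++ PySem.Str.slice roll none (some 2)
  let roll_body := PySem.Str.slice roll (some 2) none
  match loopA roll_body (PySem.List.sorted brMapA.keys (fun s => PySem.Str.len s) true) with
  | none => [("error", some "Invalid branch code")]
  | some (branch, code) =>
    match PySem.Int.ofStr? (PySem.Str.slice roll_body (some (PySem.Str.len code : Int)) none) with
    | none => []   -- int() raises ValueError here; excluded by Pre_decode_roll
    | some roll_no =>
      let sg : Option String × Option String :=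
        if branch = "CSE" then
          (some (if roll_no ≤ 65 then "CS1" else "CS2"),
           some (if roll_no ≤ 33 then "G1" else "G2"))
        else if branch = "ECE" ∨ branch = "EEE" ∨ branch = "CE" ∨ branch = "ME" then
          (some branch,
           if 1 ≤ roll_no ∧ roll_no ≤ 25 then some "G1"
           else if 26 ≤ roll_no ∧ roll_no ≤ 50 then some "G2"
           else if 51 ≤ roll_no ∧ roll_no ≤ 75 then some "G3"
           else if 76 ≤ roll_no ∧ roll_no ≤ 99 then some "G4"
           else none)
        else (none, none)
      [("year", some year), ("branch", some branch), ("section", sg.1), ("group", sg.2)]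

-- ===== PORT B =====

def fourB : PySem.Dict String String := PySem.Dict.ofList [("1212","AI-DS"),("1221","VLSI")]
def threeB : PySem.Dict String String :=
  PySem.Dict.ofList [("121","CSE"),("132","CE"),("131","ME"),("122","ECE"),("123","EEE")]

def decode_roll_alt (roll : String) : List (String × Option String) :=
  let year := "20" ++ PySem.Str.slice roll none (some 2)
  let body := PySem.Str.slice roll (some 2) none
  let p4 := PySem.Str.slice body none (some 4)
  let p3 := PySem.Str.slice body none (some 3)
  let sel : Option (String × String) :=
    if fourB.contains p4 then some (p4, fourB.getD p4 "")
    else if threeB.contains p3 then some (p3, threeB.getD p3 "")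
    else none
  match sel with
  | none => [("error", some "Invalid branch code")]
  | some (code, branch) =>
    match PySem.Int.ofStr? (PySem.Str.slice body (some (PySem.Str.len code : Int)) none) with
    | none => []   -- int() raises ValueError here; excluded by Pre_decode_roll
    | some n =>
      if branch = "CSE" then
        [("year", some year), ("branch", some branch),
         ("section", some (if n ≤ 65 then "CS1" else "CS2")),
         ("group", some (if n ≤ 33 then "G1" else "G2"))]
      else if branch = "ECE" ∨ branch = "EEE" ∨ branch = "CE" ∨ branch = "ME" then
        [("year", some year), ("branch", some branch), ("section", some branch),
         ("group", if 1 ≤ n ∧ n ≤ 99 then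
                     some ("G" ++ PySem.Int.toStr (PySem.Int.floordiv (n - 1) 25 + 1))
                   else none)]
      else
        [("year", some year), ("branch", some branch), ("section", none), ("group", none)]

-- ===== PRECONDITION & SPEC =====

-- Pre_ excludes exactly the inputs on which A raises ValueError: a branch code matches but the
-- remaining suffix of the roll string is not a valid Python int literal.
def Pre_decode_roll (roll : String) : Prop :=
  let body := roll.toList.drop 2
  (body.take 4 = "1212".toList ∨ body.take 4 = "1221".toList →
    (PySem.Int.ofChars? (body.drop 4)).isSome = true) ∧
  (¬ (body.take 4 = "1212".toList ∨ body.take 4 = "1221".toList) →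
    (body.take 3 = "121".toList ∨ body.take 3 = "132".toList ∨ body.take 3 = "131".toList ∨
     body.take 3 = "122".toList ∨ body.take 3 = "123".toList) →
    (PySem.Int.ofChars? (body.drop 3)).isSome = true)
instance (roll : String) : Decidable (Pre_decode_roll roll) := by unfold Pre_decode_roll; infer_instance

def pvWitness_decode_roll : String := "25121234"

def Spec_decode_roll (roll : String) (out : List (String × Option String)) : Prop := out = decode_roll_alt roll
instance (roll : String) (out : List (String × Option String)) : Decidable (Spec_decode_roll roll out) := by unfold Spec_decode_roll; infer_instance

-- ===== CLAIM (what is proved, stated in full; the proofs are below) =====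
def Claim_equal_decode_roll : Prop := ∀ (roll : String), Dom_decode_roll roll → Pre_decode_roll roll → Spec_decode_roll roll (decode_roll roll)

-- ===== LEMMAS AND PROOFS =====

-- startswith as a take-equation on the code points
lemma sw_iff (s c : String) :
    PySem.Str.startswith s c = true ↔ List.take c.toList.length s.toList = c.toList := by
  rw [PySem.Str.startswith_eq, PySem.Chars.startswith_iff, List.prefix_iff_eq_take]
  exact eq_comm

-- int(s) reads the code points
lemma ofStr?_toList (s : String) : PySem.Int.ofStr? s = PySem.Int.ofChars? s.toList := rfl

-- A's four range branches equal B's closed-form group for the ECE/EEE/CE/ME branches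
lemma group_eq (n : Int) :
    (if 1 ≤ n ∧ n ≤ 25 then some "G1"
     else if 26 ≤ n ∧ n ≤ 50 then some "G2"
     else if 51 ≤ n ∧ n ≤ 75 then some "G3"
     else if 76 ≤ n ∧ n ≤ 99 then some "G4"
     else none)
    = (if 1 ≤ n ∧ n ≤ 99 then
        some ("G" ++ PySem.Int.toStr (PySem.Int.floordiv (n - 1) 25 + 1))
       else (none : Option String)) := by
  split_ifs <;>
    first
    | rfl
    | omega
    | (rw [show PySem.Int.floordiv (n - 1) 25 = 0 from
        (PySem.Int.floordiv_eq_iff_of_pos (by norm_num)).mpr (by omega)]; rfl)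
    | (rw [show PySem.Int.floordiv (n - 1) 25 = 1 from
        (PySem.Int.floordiv_eq_iff_of_pos (by norm_num)).mpr (by omega)]; rfl)
    | (rw [show PySem.Int.floordiv (n - 1) 25 = 2 from
        (PySem.Int.floordiv_eq_iff_of_pos (by norm_num)).mpr (by omega)]; rfl)
    | (rw [show PySem.Int.floordiv (n - 1) 25 = 3 from
        (PySem.Int.floordiv_eq_iff_of_pos (by norm_num)).mpr (by omega)]; rfl)

-- ===== VERDICT (by name: the statement is the Claim_ definition above) =====
set_option maxHeartbeats 4000000 in
theorem decode_roll_spec : Claim_equal_decode_roll := by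
  intro roll _ hpre
  obtain ⟨h4, h3⟩ := hpre
  unfold Spec_decode_roll decode_roll decode_roll_alt
  have hb : (PySem.Str.slice roll (some 2) none).toList = roll.toList.drop 2 := by
    simp [pysem]
  have hp4 : (PySem.Str.slice (PySem.Str.slice roll (some 2) none) none (some 4)).toList
      = (roll.toList.drop 2).take 4 := by simp [pysem, hb]
  have hp3 : (PySem.Str.slice (PySem.Str.slice roll (some 2) none) none (some 3)).toList
      = (roll.toList.drop 2).take 3 := by simp [pysem, hb]
  have hsk : PySem.List.sorted brMapA.keys (fun s => PySem.Str.len s) true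
      = ["1212","1221","121","132","131","122","123"] := by rfl
  have hsw : ∀ (c : String) (L : Nat), c.toList.length = L →
      PySem.Str.startswith (PySem.Str.slice roll (some 2) none) c
      = decide ((roll.toList.drop 2).take L = c.toList) := by
    intro c L hL
    subst hL
    by_cases h : (roll.toList.drop 2).take c.toList.length = c.toList
    · rw [decide_eq_true h]
      exact (sw_iff _ c).mpr (by rw [hb]; exact h)
    · rw [decide_eq_false h]
      exact Bool.eq_false_iff.mpr (fun hcon => h (by rw [← hb]; exact (sw_iff _ c).mp hcon))
  have sw1212 := hsw "1212" 4 rfl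
  have sw1221 := hsw "1221" 4 rfl
  have sw121 := hsw "121" 3 rfl
  have sw132 := hsw "132" 3 rfl
  have sw131 := hsw "131" 3 rfl
  have sw122 := hsw "122" 3 rfl
  have sw123 := hsw "123" 3 rfl
  have hs4 : ∀ c : String, (PySem.Str.slice (PySem.Str.slice roll (some 2) none) none (some 4)) = c
      ↔ (roll.toList.drop 2).take 4 = c.toList := by
    intro c; rw [← String.toList_inj, hp4]
  have hs3 : ∀ c : String, (PySem.Str.slice (PySem.Str.slice roll (some 2) none) none (some 3)) = c
      ↔ (roll.toList.drop 2).take 3 = c.toList := by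
    intro c; rw [← String.toList_inj, hp3]
  have g1212 : brMapA.getD "1212" "" = "AI-DS" := rfl
  have g1221 : brMapA.getD "1221" "" = "VLSI" := rfl
  have g121 : brMapA.getD "121" "" = "CSE" := rfl
  have g132 : brMapA.getD "132" "" = "CE" := rfl
  have g131 : brMapA.getD "131" "" = "ME" := rfl
  have g122 : brMapA.getD "122" "" = "ECE" := rfl
  have g123 : brMapA.getD "123" "" = "EEE" := rfl
  have f1212 : fourB.getD "1212" "" = "AI-DS" := rfl
  have f1221 : fourB.getD "1221" "" = "VLSI" := rfl
  have fc1212 : fourB.contains "1212" = true := rfl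
  have fc1221 : fourB.contains "1221" = true := rfl
  have t121 : threeB.getD "121" "" = "CSE" := rfl
  have t132 : threeB.getD "132" "" = "CE" := rfl
  have t131 : threeB.getD "131" "" = "ME" := rfl
  have t122 : threeB.getD "122" "" = "ECE" := rfl
  have t123 : threeB.getD "123" "" = "EEE" := rfl
  have tc121 : threeB.contains "121" = true := rfl
  have tc132 : threeB.contains "132" = true := rfl
  have tc131 : threeB.contains "131" = true := rfl
  have tc122 : threeB.contains "122" = true := rfl
  have tc123 : threeB.contains "123" = true := rfl
  rw [hsk]
  by_cases e1 : (roll.toList.drop 2).take 4 = "1212".toList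
  · have hc : PySem.Str.slice (PySem.Str.slice roll (some 2) none) none (some 4) = "1212" :=
      (hs4 "1212").mpr e1
    obtain ⟨n, hn⟩ := Option.isSome_iff_exists.mp (h4 (Or.inl e1))
    have hps : PySem.Int.ofStr? (PySem.Str.slice (PySem.Str.slice roll (some 2) none)
        (some ((PySem.Str.len ("1212":String)) : Int)) none) = some n := by
      rw [ofStr?_toList, show ((PySem.Str.len ("1212":String)):Int) = (4:Int) from by decide]
      rw [show (PySem.Str.slice (PySem.Str.slice roll (some 2) none)
        (some (4:Int)) none).toList = (roll.toList.drop 2).drop 4 from by simp [pysem, hb]]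
      exact hn
    have hps4 : PySem.Int.ofStr? (PySem.Str.slice (PySem.Str.slice roll (some 2) none)
        (some (4:Int)) none) = some n := by
      rw [← show ((PySem.Str.len ("1212":String)):Int) = (4:Int) from by decide]
      exact hps
    simp only [loopA, sw1212, e1, decide_true, if_true]
    simp only [hc, fc1212, if_true, hps]
    simp [f1212, g1212, hps, hps4]
  · by_cases e2 : (roll.toList.drop 2).take 4 = "1221".toList
    · have hc : PySem.Str.slice (PySem.Str.slice roll (some 2) none) none (some 4) = "1221" :=
        (hs4 "1221").mpr e2
      obtain ⟨n, hn⟩ := Option.isSome_iff_exists.mp (h4 (Or.inr e2))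
      have hps : PySem.Int.ofStr? (PySem.Str.slice (PySem.Str.slice roll (some 2) none)
          (some ((PySem.Str.len ("1221":String)) : Int)) none) = some n := by
        rw [ofStr?_toList, show ((PySem.Str.len ("1221":String)):Int) = (4:Int) from by decide]
        rw [show (PySem.Str.slice (PySem.Str.slice roll (some 2) none)
          (some (4:Int)) none).toList = (roll.toList.drop 2).drop 4 from by simp [pysem, hb]]
        exact hn
      have hps4 : PySem.Int.ofStr? (PySem.Str.slice (PySem.Str.slice roll (some 2) none)
          (some (4:Int)) none) = some n := by
        rw [← show ((PySem.Str.len ("1221":String)):Int) = (4:Int) from by decide]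
        exact hps
      simp only [loopA, sw1212, sw1221, e1, e2, decide_true, decide_false, if_true, if_false]
      simp only [hc, fc1221, if_true, hps]
      simp [f1221, g1221, hps, hps4]
    · have hnot4 : ¬ ((roll.toList.drop 2).take 4 = "1212".toList ∨
          (roll.toList.drop 2).take 4 = "1221".toList) := not_or.mpr ⟨e1, e2⟩
      have hc4 : fourB.contains
          (PySem.Str.slice (PySem.Str.slice roll (some 2) none) none (some 4)) = false := by
        simp only [fourB]
        simp only [show (PySem.Dict.ofList [("1212","AI-DS"),("1221","VLSI")] :
          PySem.Dict String String) = PySem.Dict.mk [("1212","AI-DS"),("1221","VLSI")] from rfl]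
        simp only [PySem.Dict.contains_mk, List.any_cons, List.any_nil, Bool.or_false,
          Bool.or_eq_false_iff, beq_eq_false_iff_ne, ne_eq]
        exact ⟨fun h => e1 ((hs4 "1212").mp h.symm), fun h => e2 ((hs4 "1221").mp h.symm)⟩
      by_cases e3 : (roll.toList.drop 2).take 3 = "121".toList
      · have hc : PySem.Str.slice (PySem.Str.slice roll (some 2) none) none (some 3) = "121" :=
          (hs3 "121").mpr e3
        obtain ⟨n, hn⟩ := Option.isSome_iff_exists.mp (h3 hnot4 (Or.inl e3))
        have hps : PySem.Int.ofStr? (PySem.Str.slice (PySem.Str.slice roll (some 2) none)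
            (some ((PySem.Str.len ("121":String)) : Int)) none) = some n := by
          rw [ofStr?_toList, show ((PySem.Str.len ("121":String)):Int) = (3:Int) from by decide]
          rw [show (PySem.Str.slice (PySem.Str.slice roll (some 2) none)
            (some (3:Int)) none).toList = (roll.toList.drop 2).drop 3 from by simp [pysem, hb]]
          exact hn
        have hps4 : PySem.Int.ofStr? (PySem.Str.slice (PySem.Str.slice roll (some 2) none)
            (some (3:Int)) none) = some n := by
          rw [← show ((PySem.Str.len ("121":String)):Int) = (3:Int) from by decide]
          exact hps
        simp only [loopA, sw1212, sw1221, sw121, sw132, sw131, sw122, sw123, e1, e2, e3, decide_true,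
          decide_false, if_true, if_false]
        simp only [hc, hc4, Bool.false_eq_true, if_false, tc121, if_true, hps]
        simp [t121, g121, hps, hps4]
      · by_cases e4 : (roll.toList.drop 2).take 3 = "132".toList
        · have hc : PySem.Str.slice (PySem.Str.slice roll (some 2) none) none (some 3) = "132" :=
            (hs3 "132").mpr e4
          obtain ⟨n, hn⟩ := Option.isSome_iff_exists.mp (h3 hnot4 (Or.inr (Or.inl e4)))
          have hps : PySem.Int.ofStr? (PySem.Str.slice (PySem.Str.slice roll (some 2) none)
              (some ((PySem.Str.len ("132":String)) : Int)) none) = some n := by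
            rw [ofStr?_toList, show ((PySem.Str.len ("132":String)):Int) = (3:Int) from by decide]
            rw [show (PySem.Str.slice (PySem.Str.slice roll (some 2) none)
              (some (3:Int)) none).toList = (roll.toList.drop 2).drop 3 from by simp [pysem, hb]]
            exact hn
          have hps4 : PySem.Int.ofStr? (PySem.Str.slice (PySem.Str.slice roll (some 2) none)
              (some (3:Int)) none) = some n := by
            rw [← show ((PySem.Str.len ("132":String)):Int) = (3:Int) from by decide]
            exact hps
          simp only [loopA, sw1212, sw1221, sw121, sw132, sw131, sw122, sw123, e1, e2, e3, e4, decide_true,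
            decide_false, if_true, if_false]
          simp only [hc, hc4, Bool.false_eq_true, if_false, tc132, if_true, hps]
          simp [t132, g132, hps, hps4, group_eq n]
        · by_cases e5 : (roll.toList.drop 2).take 3 = "131".toList
          · have hc : PySem.Str.slice (PySem.Str.slice roll (some 2) none) none (some 3) = "131" :=
              (hs3 "131").mpr e5
            obtain ⟨n, hn⟩ := Option.isSome_iff_exists.mp (h3 hnot4 (Or.inr (Or.inr (Or.inl e5))))
            have hps : PySem.Int.ofStr? (PySem.Str.slice (PySem.Str.slice roll (some 2) none)
                (some ((PySem.Str.len ("131":String)) : Int)) none) = some n := by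
              rw [ofStr?_toList, show ((PySem.Str.len ("131":String)):Int) = (3:Int) from by decide]
              rw [show (PySem.Str.slice (PySem.Str.slice roll (some 2) none)
                (some (3:Int)) none).toList = (roll.toList.drop 2).drop 3 from by simp [pysem, hb]]
              exact hn
            have hps4 : PySem.Int.ofStr? (PySem.Str.slice (PySem.Str.slice roll (some 2) none)
                (some (3:Int)) none) = some n := by
              rw [← show ((PySem.Str.len ("131":String)):Int) = (3:Int) from by decide]
              exact hps
            simp only [loopA, sw1212, sw1221, sw121, sw132, sw131, sw122, sw123, e1, e2, e3, e4, e5, decide_true,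
              decide_false, if_true, if_false]
            simp only [hc, hc4, Bool.false_eq_true, if_false, tc131, if_true, hps]
            simp [t131, g131, hps, hps4, group_eq n]
          · by_cases e6 : (roll.toList.drop 2).take 3 = "122".toList
            · have hc : PySem.Str.slice (PySem.Str.slice roll (some 2) none) none (some 3) = "122" :=
                (hs3 "122").mpr e6
              obtain ⟨n, hn⟩ := Option.isSome_iff_exists.mp (h3 hnot4 (Or.inr (Or.inr (Or.inr (Or.inl e6)))))
              have hps : PySem.Int.ofStr? (PySem.Str.slice (PySem.Str.slice roll (some 2) none)
                  (some ((PySem.Str.len ("122":String)) : Int)) none) = some n := by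
                rw [ofStr?_toList, show ((PySem.Str.len ("122":String)):Int) = (3:Int) from by decide]
                rw [show (PySem.Str.slice (PySem.Str.slice roll (some 2) none)
                  (some (3:Int)) none).toList = (roll.toList.drop 2).drop 3 from by simp [pysem, hb]]
                exact hn
              have hps4 : PySem.Int.ofStr? (PySem.Str.slice (PySem.Str.slice roll (some 2) none)
                  (some (3:Int)) none) = some n := by
                rw [← show ((PySem.Str.len ("122":String)):Int) = (3:Int) from by decide]
                exact hps
              simp only [loopA, sw1212, sw1221, sw121, sw132, sw131, sw122, sw123, e1, e2, e3, e4, e5, e6, decide_true,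
                decide_false, if_true, if_false]
              simp only [hc, hc4, Bool.false_eq_true, if_false, tc122, if_true, hps]
              simp [t122, g122, hps, hps4, group_eq n]
            · by_cases e7 : (roll.toList.drop 2).take 3 = "123".toList
              · have hc : PySem.Str.slice (PySem.Str.slice roll (some 2) none) none (some 3) = "123" :=
                  (hs3 "123").mpr e7
                obtain ⟨n, hn⟩ := Option.isSome_iff_exists.mp (h3 hnot4 (Or.inr (Or.inr (Or.inr (Or.inr e7)))))
                have hps : PySem.Int.ofStr? (PySem.Str.slice (PySem.Str.slice roll (some 2) none)
                    (some ((PySem.Str.len ("123":String)) : Int)) none) = some n := by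
                  rw [ofStr?_toList, show ((PySem.Str.len ("123":String)):Int) = (3:Int) from by decide]
                  rw [show (PySem.Str.slice (PySem.Str.slice roll (some 2) none)
                    (some (3:Int)) none).toList = (roll.toList.drop 2).drop 3 from by simp [pysem, hb]]
                  exact hn
                have hps4 : PySem.Int.ofStr? (PySem.Str.slice (PySem.Str.slice roll (some 2) none)
                    (some (3:Int)) none) = some n := by
                  rw [← show ((PySem.Str.len ("123":String)):Int) = (3:Int) from by decide]
                  exact hps
                simp only [loopA, sw1212, sw1221, sw121, sw132, sw131, sw122, sw123, e1, e2, e3, e4, e5, e6, e7, decide_true,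
                  decide_false, if_true, if_false]
                simp only [hc, hc4, Bool.false_eq_true, if_false, tc123, if_true, hps]
                simp [t123, g123, hps, hps4, group_eq n]
              · have hc3 : threeB.contains
                    (PySem.Str.slice (PySem.Str.slice roll (some 2) none) none (some 3)) = false := by
                  simp only [threeB]
                  simp only [show (PySem.Dict.ofList [("121","CSE"),("132","CE"),("131","ME"),
                    ("122","ECE"),("123","EEE")] : PySem.Dict String String)
                    = PySem.Dict.mk [("121","CSE"),("132","CE"),("131","ME"),
                    ("122","ECE"),("123","EEE")] from rfl]
                  simp only [PySem.Dict.contains_mk, List.any_cons, List.any_nil, Bool.or_false,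
                    Bool.or_eq_false_iff, beq_eq_false_iff_ne, ne_eq]
                  exact ⟨fun h => e3 ((hs3 "121").mp h.symm), fun h => e4 ((hs3 "132").mp h.symm),
                    fun h => e5 ((hs3 "131").mp h.symm), fun h => e6 ((hs3 "122").mp h.symm),
                    fun h => e7 ((hs3 "123").mp h.symm)⟩
                simp only [loopA, sw1212, sw1221, sw121, sw132, sw131, sw122, sw123, e1, e2, e3, e4, e5, e6, e7,
                  decide_false, if_false]
                simp [hc4, hc3]
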